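-- pv_equiv track=rewrite | github.com/CharlesCodyRoss/gee-elevation-data-explorer | commands_database.py | string_comments_on_keywords
-- ===== SOURCE A (Python) =====
-- def string_comments_on_keywords(entry):
--     """
--     Certain keywords need to be contained in strings when transforming scrape commands to python commands.
--     This function will analyze the entry to see if it matches one of the keywords and then will wrap
--     that keyword with string comments.
--     """
--
--     keyword_list = [
--         'palette',
--         'color',
--         'bands',
--         'min',
--         'max',
--         'gamma',
--         'pointSize',
--         'filter_index'
--     ]
--
--     edit_string = entry
--
--     for keyword in keyword_list:
--
--         if keyword in entry:
--             edit_string = edit_string.replace(keyword, f"'{keyword}'")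
--
--         else:
--             pass
--
--     return edit_string
-- ===== SOURCE B (Python) =====
-- def string_comments_on_keywords(entry):
--     """Single left-to-right scan: at each position emit a quoted keyword if one
--     starts there (skipping past it), otherwise copy the character."""
--     keywords = ('palette', 'color', 'bands', 'min', 'max',
--                 'gamma', 'pointSize', 'filter_index')
--     out = []
--     i = 0
--     n = len(entry)
--     while i < n:
--         for kw in keywords:
--             if entry.startswith(kw, i):
--                 out.append("'" + kw + "'")
--                 i += len(kw)
--                 break
--         else:
--             out.append(entry[i])
--             i += 1
--     return ''.join(out)
-- ===== Notes on version B (the rewrite author's own statement) =====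
-- stated objective: alternative
-- what changed: Replaced eight sequential full-string .replace passes with one left-to-right scan that quotes a keyword where it starts and copies every other character (single pass, no intermediate strings).
-- outside the precondition, e.g. on string_comments_on_keywords('gammax'): A returns "gam'max'", B returns "'gamma'x"
import Mathlib
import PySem

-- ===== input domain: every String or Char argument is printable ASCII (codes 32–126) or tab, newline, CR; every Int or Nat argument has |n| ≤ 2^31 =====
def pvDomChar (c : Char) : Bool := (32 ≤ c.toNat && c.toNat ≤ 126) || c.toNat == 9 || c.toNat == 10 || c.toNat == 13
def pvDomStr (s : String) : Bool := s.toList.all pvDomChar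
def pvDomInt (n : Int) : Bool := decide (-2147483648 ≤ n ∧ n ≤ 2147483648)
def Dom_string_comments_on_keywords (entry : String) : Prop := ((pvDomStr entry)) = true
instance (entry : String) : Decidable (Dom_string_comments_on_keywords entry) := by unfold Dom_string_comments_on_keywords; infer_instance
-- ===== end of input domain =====

-- B replaces A's eight sequential full-string .replace passes by one left-to-right scan that
-- quotes a keyword where one starts and copies every other character (alternative: a single pass).


-- ===== PORT A =====
def string_comments_on_keywords (entry : String) : String :=
  let keyword_list : List String :=
    ["palette", "color", "bands", "min", "max", "gamma", "pointSize", "filter_index"]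
  let edit_string := entry
  keyword_list.foldl (fun edit_string keyword =>
    if PySem.Str.isIn keyword entry then
      PySem.Str.replace edit_string keyword ("'" ++ keyword ++ "'")
    else
      edit_string) edit_string

-- ===== PORT B =====
-- the keywords, as character lists (B scans the string as a list of characters)
def pvKw : List (List Char) :=
  ["palette".toList, "color".toList, "bands".toList, "min".toList, "max".toList,
   "gamma".toList, "pointSize".toList, "filter_index".toList]

-- the single left-to-right scan of Source B: quote a keyword that starts here, else copy the char
def pvScan : List Char → List Char
  | [] => []
  | c :: t =>
    match pvKw.find? (fun k => k.isPrefixOf (c :: t)) with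
    | some k => '\'' :: (k ++ '\'' :: pvScan (t.drop (k.length - 1)))
    | none => c :: pvScan t
termination_by l => l.length
decreasing_by all_goals simp

def string_comments_on_keywords_alt (entry : String) : String :=
  String.ofList (pvScan entry.toList)

-- ===== PRECONDITION & SPEC =====
-- Pre_ excludes entries containing "gammax", the one place a 'gamma' occurrence overlaps a
-- 'max' occurrence: A's pass order quotes the 'max' ("gam'max'"), B's left-to-right scan
-- quotes the 'gamma' ("'gamma'x"); both quotings are defensible on this unspecified corner.
def Pre_string_comments_on_keywords (entry : String) : Prop :=
  PySem.Str.isIn "gammax" entry = false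
instance (entry : String) : Decidable (Pre_string_comments_on_keywords entry) := by
  unfold Pre_string_comments_on_keywords; infer_instance

def pvWitness_string_comments_on_keywords : String := "set min and max, gamma too"

def Spec_string_comments_on_keywords (entry : String) (out : String) : Prop := out = string_comments_on_keywords_alt entry
instance (entry : String) (out : String) : Decidable (Spec_string_comments_on_keywords entry out) := by unfold Spec_string_comments_on_keywords; infer_instance

-- ===== CLAIM (what is proved, stated in full; the proofs are below) =====
def Claim_equal_string_comments_on_keywords : Prop := ∀ (entry : String), Dom_string_comments_on_keywords entry → Pre_string_comments_on_keywords entry → Spec_string_comments_on_keywords entry (string_comments_on_keywords entry)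

-- ===== LEMMAS AND PROOFS =====

-- tokenization of a string by B's scan: keyword tokens and single-character tokens
def pvToks : List Char → List (List Char)
  | [] => []
  | c :: t =>
    match pvKw.find? (fun k => k.isPrefixOf (c :: t)) with
    | some k => k :: pvToks (t.drop (k.length - 1))
    | none => [c] :: pvToks t
termination_by l => l.length
decreasing_by all_goals simp

-- render a token, quoting it if it is a keyword already processed (member of S)
def pvRend (S : List (List Char)) (p : List Char) : List Char :=
  if p ∈ S then '\'' :: p ++ ['\''] else p

-- simple structural model of Python's str.replace (left-to-right, non-overlapping)
def pvRepl (old new : List Char) : List Char → List Char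
  | [] => []
  | c :: t =>
    if old.isPrefixOf (c :: t) then new ++ pvRepl old new (t.drop (old.length - 1))
    else c :: pvRepl old new t
termination_by l => l.length
decreasing_by all_goals simp

-- the rendered token list, for a processed-set S
def pvRendAll (S : List (List Char)) (s : List Char) : List Char :=
  ((pvToks s).map (pvRend S)).flatten

-- one pass of A, at the character level
def pvStep (entry : List Char) (x k : List Char) : List Char :=
  if PySem.Chars.isIn k entry then PySem.Chars.replace x k ('\'' :: k ++ ['\'']) else x

-- ---- decidable facts about the fixed keyword list ----
theorem pvKw_nonnil : ∀ k ∈ pvKw, k ≠ [] := by decide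
theorem pvKw_len1 : ∀ k ∈ pvKw, 1 < k.length := by decide
theorem pvKw_noquote : ∀ k ∈ pvKw, '\'' ∉ k := by decide
theorem pvKw_nopref : ∀ p ∈ pvKw, ∀ k ∈ pvKw, p ≠ k → ¬ p <+: k := by decide
theorem pvKw_noinf : ∀ p ∈ pvKw, ∀ k ∈ pvKw, p ≠ k → ¬ k <:+: p := by decide
theorem pvKw_nodup : pvKw.Nodup := by decide
theorem pvKw_overlap : ∀ p ∈ pvKw, ∀ k ∈ pvKw, ∀ j, j < p.length → 1 ≤ j →
    (p.drop j) <+: k → p = "gamma".toList ∧ k = "max".toList ∧ j = 3 := by decide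

-- ---- generic prefix lemmas ----
theorem pv_pref_le {w u v : List Char} (h : w <+: u ++ v) (hl : w.length ≤ u.length) : w <+: u :=
  List.prefix_of_prefix_length_le h (List.prefix_append u v) hl

theorem pv_split {w u v : List Char} (h : w <+: u ++ v) (hl : u.length ≤ w.length) :
    u <+: w ∧ w.drop u.length <+: v := by
  have hu : u <+: w := List.prefix_of_prefix_length_le (List.prefix_append u v) h hl
  refine ⟨hu, ?_⟩
  obtain ⟨w', rfl⟩ := hu
  simpa using ((List.prefix_append_right_inj u).mp (by simpa using h))

theorem pv_quote_block {q : Char} {w u v : List Char} (hq : q ∉ w)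
    (h : w <+: u ++ q :: v) : w <+: u := by
  induction u generalizing w with
  | nil =>
    cases w with
    | nil => exact List.nil_prefix
    | cons a w' =>
      rcases h with ⟨r, hr⟩
      simp at hr
      exact absurd (hr.1 ▸ List.mem_cons_self) hq
  | cons a u' ih =>
    cases w with
    | nil => exact List.nil_prefix
    | cons b w' =>
      rcases h with ⟨r, hr⟩
      simp at hr
      obtain ⟨rfl, hr⟩ := hr
      have : w' <+: u' ++ q :: v := ⟨r, hr⟩
      exact List.cons_prefix_cons.mpr ⟨rfl, ih (fun h' => hq (List.mem_cons_of_mem _ h')) this⟩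

-- ---- pvRepl equations ----
theorem pvRepl_nil (old new : List Char) : pvRepl old new [] = [] := by simp [pvRepl]

theorem pvRepl_cons_pos {old : List Char} (new : List Char) {c : Char} {t : List Char}
    (h : old <+: c :: t) :
    pvRepl old new (c :: t) = new ++ pvRepl old new (t.drop (old.length - 1)) := by
  rw [pvRepl, if_pos (by simpa using List.isPrefixOf_iff_prefix.mpr h)]

theorem pvRepl_cons_neg {old : List Char} (new : List Char) {c : Char} {t : List Char}
    (h : ¬ old <+: c :: t) :
    pvRepl old new (c :: t) = c :: pvRepl old new t := by
  rw [pvRepl, if_neg (by simpa using fun hh => h (List.isPrefixOf_iff_prefix.mp hh))]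

theorem pvRepl_skip {old new : List Char} : ∀ (u v : List Char),
    (∀ j < u.length, ¬ old <+: (u.drop j ++ v)) →
    pvRepl old new (u ++ v) = u ++ pvRepl old new v := by
  intro u
  induction u with
  | nil => intro v _; simp
  | cons a u' ih =>
    intro v h
    have h0 : ¬ old <+: a :: (u' ++ v) := by
      have := h 0 (by simp)
      simpa using this
    rw [List.cons_append, pvRepl_cons_neg _ h0, ih v (fun j hj => by
      have := h (j + 1) (by simpa using Nat.succ_lt_succ hj)
      simpa using this)]
    simp

-- ---- replace = pvRepl ----
theorem pvGo_eq {old : List Char} (hne : old ≠ []) (new : List Char) :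
    ∀ (fuel : Nat) (l acc : List Char), l.length ≤ fuel →
    PySem.Chars.replace.go old new fuel l acc = acc.reverse ++ pvRepl old new l := by
  intro fuel
  induction fuel with
  | zero =>
    intro l acc hl
    have : l = [] := List.length_eq_zero_iff.mp (Nat.le_zero.mp hl)
    subst this
    simp [PySem.Chars.replace.go, pvRepl_nil]
  | succ n ih =>
    intro l acc hl
    cases l with
    | nil => simp [PySem.Chars.replace.go, pvRepl_nil]
    | cons c t =>
      rw [PySem.Chars.replace.go]
      by_cases hp : old <+: c :: t
      · rw [if_pos (List.isPrefixOf_iff_prefix.mpr hp)]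
        have hlen : 1 ≤ old.length := by
          cases old with
          | nil => exact absurd rfl hne
          | cons _ _ => simp
        have hdrop : (c :: t).drop old.length = t.drop (old.length - 1) := by
          cases old with
          | nil => exact absurd rfl hne
          | cons o os => simp
        rw [hdrop, ih _ _ (by simp at hl ⊢; omega), pvRepl_cons_pos new hp]
        simp
      · rw [if_neg (fun hh => hp (List.isPrefixOf_iff_prefix.mp hh)),
          ih _ _ (by simp at hl ⊢; omega), pvRepl_cons_neg new hp]
        simp

theorem pvReplace_eq {old : List Char} (hne : old ≠ []) (new s : List Char) :
    PySem.Chars.replace s old new = pvRepl old new s := by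
  rw [PySem.Chars.replace]
  rw [if_neg (by simpa using hne)]
  simpa using pvGo_eq hne new s.length s [] le_rfl

-- ---- tokenization facts ----
theorem pvToks_flatten : ∀ s : List Char, (pvToks s).flatten = s := by
  intro s
  fun_induction pvToks s with
  | case1 => simp
  | case2 c t k hk ih =>
    have hkK : k ∈ pvKw := List.mem_of_find?_eq_some hk
    have hpre : k <+: c :: t := List.isPrefixOf_iff_prefix.mp (by
      have := List.find?_some hk; simpa using this)
    have hne := pvKw_nonnil k hkK
    have h1 : 1 ≤ k.length := by
      cases k with
      | nil => exact absurd rfl hne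
      | cons _ _ => simp
    have hdrop : (c :: t).drop k.length = t.drop (k.length - 1) := by
      cases k with
      | nil => exact absurd rfl hne
      | cons o os => simp
    simp only [List.flatten_cons, ih]
    rw [← hdrop]
    exact List.prefix_iff_eq_append.mp hpre
  | case3 c t hk ih => simp [ih]

theorem pvToks_mem_infix : ∀ (s p : List Char), p ∈ pvToks s → p ∈ pvKw → p <:+: s := by
  intro s
  fun_induction pvToks s with
  | case1 => intro p h; simp at h
  | case2 c t k hk ih =>
    intro p hp hpK
    rcases List.mem_cons.mp hp with rfl | hp'
    · have hpre : p <+: c :: t := List.isPrefixOf_iff_prefix.mp (by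
        have := List.find?_some hk; simpa using this)
      exact hpre.isInfix
    · exact ((ih p hp' hpK).trans (List.drop_suffix _ _).isInfix).trans
        (List.suffix_cons c t).isInfix
  | case3 c t hk ih =>
    intro p hp hpK
    rcases List.mem_cons.mp hp with rfl | hp'
    · have := pvKw_len1 _ hpK; simp at this
    · exact (ih p hp' hpK).trans (List.suffix_cons c t).isInfix

-- B's scan renders every token with the full keyword set quoted
theorem pvScan_eq_rend : ∀ s : List Char, pvScan s = pvRendAll pvKw s := by
  intro s
  fun_induction pvScan s with
  | case1 => simp [pvRendAll, pvToks]
  | case2 c t k hk ih =>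
    have hkK : k ∈ pvKw := List.mem_of_find?_eq_some hk
    simp only [pvRendAll, pvToks, hk, List.map_cons, List.flatten_cons, pvRend, if_pos hkK]
    simp [pvRendAll] at ih
    simp [ih]
  | case3 c t hk ih =>
    have hcK : [c] ∉ pvKw := fun h => by have := pvKw_len1 _ h; simp at this
    simp only [pvRendAll, pvToks, hk, List.map_cons, List.flatten_cons, pvRend, if_neg hcK]
    simp [pvRendAll] at ih
    simp [ih]

-- rendering never invents an occurrence of a quote-free word: a prefix of the rendered
-- string is a prefix of the raw token concatenation
theorem pvRend_prefix (S : List (List Char)) : ∀ (ts : List (List Char)) (w : List Char),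
    '\'' ∉ w → w <+: (ts.map (pvRend S)).flatten → w <+: ts.flatten := by
  intro ts
  induction ts with
  | nil => simp
  | cons p ts' ih =>
    intro w hq h
    by_cases hpS : p ∈ S
    · simp only [List.map_cons, List.flatten_cons, pvRend, if_pos hpS] at h
      cases w with
      | nil => exact List.nil_prefix
      | cons a w' =>
        rcases h with ⟨r, hr⟩
        simp at hr
        exact absurd (hr.1 ▸ List.mem_cons_self) hq
    · simp only [List.map_cons, List.flatten_cons, pvRend, if_neg hpS] at h
      by_cases hl : w.length ≤ p.length
      · exact (pv_pref_le h hl).trans (List.prefix_append _ _)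
      · obtain ⟨hpw, hrest⟩ := pv_split h (by omega)
        have h2 := ih (w.drop p.length) (fun hm => hq (List.mem_of_mem_drop hm)) hrest
        calc w = p ++ w.drop p.length := (List.prefix_iff_eq_append.mp hpw).symm
          _ <+: p ++ ts'.flatten := (List.prefix_append_right_inj p).mpr h2
          _ = (p :: ts').flatten := by simp

-- rendering equations
theorem pvRend_mem {S : List (List Char)} {p : List Char} (h : p ∈ S) :
    pvRend S p = '\'' :: p ++ ['\''] := by unfold pvRend; rw [if_pos h]

theorem pvRend_not_mem {S : List (List Char)} {p : List Char} (h : p ∉ S) :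
    pvRend S p = p := by unfold pvRend; rw [if_neg h]

-- rendering with S ⊆ pvKw leaves [c] tokens bare
theorem pvRend_char (S : List (List Char)) (hS : ∀ p ∈ S, p ∈ pvKw) (c : Char) :
    pvRend S [c] = [c] := by
  unfold pvRend
  rw [if_neg (fun h => by have := pvKw_len1 _ (hS _ h); simp at this)]

-- rendering with the empty processed set is the identity
theorem pvRendAll_nilS (s : List Char) : pvRendAll [] s = s := by
  unfold pvRendAll
  have h : (pvToks s).map (pvRend []) = (pvToks s).map id :=
    List.map_congr_left (fun p _ => by simp [pvRend])
  rw [h, List.map_id, pvToks_flatten]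

-- head of the rendered suffix: empty, a quote, or the first raw character
theorem pvRendAll_head (S : List (List Char)) (hS : ∀ p ∈ S, p ∈ pvKw) (s : List Char) :
    (pvRendAll S s).head? = none ∨ (pvRendAll S s).head? = some '\'' ∨
    (pvRendAll S s).head? = s.head? := by
  unfold pvRendAll
  cases s with
  | nil => left; simp [pvToks]
  | cons c t =>
    cases hf : pvKw.find? (fun k => k.isPrefixOf (c :: t)) with
    | none =>
      right; right
      rw [pvToks, hf]
      simp [pvRend_char S hS]
    | some k =>
      have hkK : k ∈ pvKw := List.mem_of_find?_eq_some hf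
      have hpre : k <+: c :: t := List.isPrefixOf_iff_prefix.mp (by
        have := List.find?_some hf; simpa using this)
      rw [pvToks, hf]
      by_cases hkS : k ∈ S
      · right; left; simp [pvRend_mem hkS]
      · right; right
        simp only [List.map_cons, List.flatten_cons, pvRend_not_mem hkS]
        cases k with
        | nil => exact absurd rfl (pvKw_nonnil _ hkK)
        | cons a k' =>
          have : a = c := (List.cons_prefix_cons.mp hpre).1
          simp [this]

theorem pvRepl_self_prefix {k : List Char} (hne : k ≠ []) (new v : List Char) :
    pvRepl k new (k ++ v) = new ++ pvRepl k new v := by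
  cases k with
  | nil => exact absurd rfl hne
  | cons a k' =>
    rw [List.cons_append, pvRepl_cons_pos new (by simpa using List.prefix_append (a :: k') v)]
    simp

-- the key distribution lemma: one replace pass over the rendered string quotes exactly
-- the tokens equal to that keyword
theorem pvDist (entry : List Char) (hpre : ¬ ("gammax".toList <:+: entry))
    (k : List Char) (hk : k ∈ pvKw) (P : List (List Char)) (hP : ∀ p ∈ P, p ∈ pvKw)
    (hkP : k ∉ P) :
    ∀ s, s <:+ entry →
      pvRepl k ('\'' :: k ++ ['\'']) (pvRendAll P s) = pvRendAll (P ++ [k]) s := by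
  have hne : k ≠ [] := pvKw_nonnil _ hk
  have hq : '\'' ∉ k := pvKw_noquote _ hk
  intro s
  unfold pvRendAll
  fun_induction pvToks s with
  | case1 => intro _; simp [pvRepl_nil]
  | case2 c t k0 hf ih =>
    intro hs
    have hk0K : k0 ∈ pvKw := List.mem_of_find?_eq_some hf
    have hpre0 : k0 <+: c :: t := List.isPrefixOf_iff_prefix.mp (by
      have := List.find?_some hf; simpa using this)
    have hne0 : k0 ≠ [] := pvKw_nonnil _ hk0K
    have hdrop : (c :: t).drop k0.length = t.drop (k0.length - 1) := by
      cases k0 with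
      | nil => exact absurd rfl hne0
      | cons o os => simp
    have hsplit : k0 ++ t.drop (k0.length - 1) = c :: t := by
      rw [← hdrop]; exact List.prefix_iff_eq_append.mp hpre0
    have hs' : t.drop (k0.length - 1) <:+ entry :=
      List.IsSuffix.trans ⟨k0, hsplit⟩ hs
    have ihs := ih hs'
    by_cases hk0k : k0 = k
    · subst hk0k
      simp only [List.map_cons, List.flatten_cons, pvRend_not_mem hkP,
        pvRend_mem (by simp : k0 ∈ P ++ [k0])]
      rw [pvRepl_self_prefix hne0, ihs]
    · by_cases hk0P : k0 ∈ P
      · simp only [List.map_cons, List.flatten_cons, pvRend_mem hk0P,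
          pvRend_mem (List.mem_append_left _ hk0P)]
        have hskip : ∀ j < ('\'' :: k0 ++ ['\'']).length,
            ¬ k <+: ('\'' :: k0 ++ ['\'']).drop j ++
              ((pvToks (t.drop (k0.length - 1))).map (pvRend P)).flatten := by
          intro j hj hpref
          rcases Nat.eq_zero_or_pos j with rfl | hj1
          · simp only [List.drop_zero] at hpref
            cases k with
            | nil => exact hne rfl
            | cons a k' =>
              have ha : a = '\'' := by
                rw [List.cons_append] at hpref
                exact (List.cons_prefix_cons.mp hpref).1
              exact hq (ha ▸ List.mem_cons_self)
          · have hdq : ('\'' :: k0 ++ ['\'']).drop j = k0.drop (j - 1) ++ ['\''] := by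
              cases j with
              | zero => omega
              | succ j' =>
                simp only [List.cons_append, List.drop_succ_cons, Nat.add_sub_cancel]
                rw [List.drop_append_of_le_length (by
                  simp only [List.length_append, List.length_cons, List.length_nil] at hj
                  omega)]
            rw [hdq, List.append_assoc] at hpref
            have hkk0 := pv_quote_block hq hpref
            exact pvKw_noinf k0 hk0K k hk hk0k
              ((hkk0.isInfix).trans (List.drop_suffix _ _).isInfix)
        calc pvRepl k ('\'' :: k ++ ['\''])
              ('\'' :: k0 ++ ['\''] ++ ((pvToks (t.drop (k0.length - 1))).map (pvRend P)).flatten)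
            = '\'' :: k0 ++ ['\''] ++ pvRepl k ('\'' :: k ++ ['\''])
                (((pvToks (t.drop (k0.length - 1))).map (pvRend P)).flatten) := by
              rw [pvRepl_skip _ _ hskip]
          _ = _ := by rw [ihs]
      · -- unprocessed, non-k keyword token: rendered bare
        simp only [List.map_cons, List.flatten_cons, pvRend_not_mem hk0P,
          pvRend_not_mem (by simp [hk0P, hk0k] : k0 ∉ P ++ [k])]
        have hskip : ∀ j < k0.length,
            ¬ k <+: k0.drop j ++
              ((pvToks (t.drop (k0.length - 1))).map (pvRend P)).flatten := by
          intro j hj hpref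
          rcases Nat.eq_zero_or_pos j with rfl | hj1
          · simp only [List.drop_zero] at hpref
            by_cases hl : k.length ≤ k0.length
            · exact pvKw_nopref k hk k0 hk0K (fun h => hk0k h.symm) (pv_pref_le hpref hl)
            · exact pvKw_nopref k0 hk0K k hk hk0k (pv_split hpref (by omega)).1
          · by_cases hl : k.length ≤ (k0.drop j).length
            · exact pvKw_noinf k0 hk0K k hk hk0k
                (((pv_pref_le hpref hl).isInfix).trans (List.drop_suffix _ _).isInfix)
            · have hov := (pv_split hpref (by omega)).1
              obtain ⟨hg, hm, hj3⟩ := pvKw_overlap k0 hk0K k hk j hj hj1 hov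
              subst hj3 hg hm
              -- the only overlap: k0 = "gamma", k = "max"; the next raw char must be 'x'
              have e2 : "gamma".toList.drop 3 = ['m', 'a'] := by decide
              have em : "max".toList = ['m', 'a', 'x'] := by decide
              rw [e2, em] at hpref
              obtain ⟨r, hr⟩ := hpref
              simp only [List.cons_append, List.nil_append, List.cons.injEq,
                true_and] at hr
              -- hr : 'x' :: r = rendered tail
              have hh := pvRendAll_head P hP (t.drop ("gamma".toList.length - 1))
              unfold pvRendAll at hh
              rw [← hr] at hh
              simp only [List.head?_cons] at hh
              rcases hh with h | h | h
              · simp at h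
              · simp at h
              · cases hx : t.drop ("gamma".toList.length - 1) with
                | nil => rw [hx] at h; simp at h
                | cons c0 t'' =>
                  rw [hx] at h
                  simp only [List.head?_cons, Option.some.injEq] at h
                  apply hpre
                  have hgx : "gammax".toList <+: c :: t := by
                    rw [← hsplit, hx, ← h]
                    have e3 : "gammax".toList = "gamma".toList ++ ['x'] := by decide
                    rw [e3]
                    exact (List.prefix_append_right_inj _).mpr ⟨t'', rfl⟩
                  exact hgx.isInfix.trans hs.isInfix
        rw [pvRepl_skip _ _ hskip, ihs]
  | case3 c t hf ih =>
    intro hs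
    have ihs := ih ((List.suffix_cons c t).trans hs)
    have hcP : ([c] : List Char) ∉ P := fun h => by
      have := pvKw_len1 _ (hP _ h); simp at this
    have hcPk : ([c] : List Char) ∉ P ++ [k] := by
      simp only [List.mem_append, List.mem_singleton]
      rintro (h | rfl)
      · exact hcP h
      · have := pvKw_len1 _ hk; simp at this
    simp only [List.map_cons, List.flatten_cons, pvRend_not_mem hcP, pvRend_not_mem hcPk]
    have hnp : ¬ k <+: c :: ((pvToks t).map (pvRend P)).flatten := by
      intro h
      have h2 : k <+: ((pvToks (c :: t)).map (pvRend P)).flatten := by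
        rw [pvToks, hf]
        simpa [pvRend_char P hP] using h
      have h3 := pvRend_prefix P _ _ hq h2
      rw [pvToks_flatten] at h3
      have h4 : ¬ k <+: c :: t := by
        simpa [List.isPrefixOf_iff_prefix] using List.find?_eq_none.mp hf k hk
      exact h4 h3
    rw [List.singleton_append, pvRepl_cons_neg _ hnp, ihs]
    simp

theorem pvStep_eq (entry : List Char) (hpre : ¬ ("gammax".toList <:+: entry))
    (k : List Char) (hk : k ∈ pvKw) (P : List (List Char)) (hP : ∀ p ∈ P, p ∈ pvKw)
    (hkP : k ∉ P) :
    pvStep entry (pvRendAll P entry) k = pvRendAll (P ++ [k]) entry := by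
  unfold pvStep
  split_ifs with hin
  · rw [pvReplace_eq (pvKw_nonnil _ hk)]
    exact pvDist entry hpre k hk P hP hkP entry (List.suffix_refl entry)
  · have hninf : ¬ k <:+: entry :=
      (PySem.Chars.isIn_eq_false_iff k entry).mp (by simpa using hin)
    unfold pvRendAll
    have hcong : ∀ p ∈ pvToks entry, pvRend P p = pvRend (P ++ [k]) p := by
      intro p hp
      by_cases hpP : p ∈ P
      · rw [pvRend_mem hpP, pvRend_mem (List.mem_append_left _ hpP)]
      · have hpk : p ≠ k := by
          rintro rfl
          exact hninf (pvToks_mem_infix entry p hp hk)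
        rw [pvRend_not_mem hpP, pvRend_not_mem (by simp [hpP, hpk])]
    rw [List.map_congr_left hcong]

theorem pvFoldl_eq (entry : List Char) (hpre : ¬ ("gammax".toList <:+: entry)) :
    ∀ (KS KP : List (List Char)), KP ++ KS = pvKw →
      KS.foldl (pvStep entry) (pvRendAll KP entry) = pvRendAll pvKw entry := by
  intro KS
  induction KS with
  | nil =>
    intro KP h
    rw [List.append_nil] at h
    rw [List.foldl_nil, h]
  | cons k KS' ih =>
    intro KP h
    have hkK : k ∈ pvKw := by rw [← h]; simp
    have hP : ∀ p ∈ KP, p ∈ pvKw := fun p hp => by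
      rw [← h]; exact List.mem_append_left _ hp
    have hnd : (KP ++ k :: KS').Nodup := h.symm ▸ pvKw_nodup
    have hkP : k ∉ KP := fun hkp =>
      (List.disjoint_of_nodup_append hnd) hkp (by simp)
    rw [List.foldl_cons, pvStep_eq entry hpre k hkK KP hP hkP]
    exact ih (KP ++ [k]) (by simpa using h)

theorem portA_toList (entry : String) : ∀ (ks : List String) (x : String),
    (ks.foldl (fun e kw => if PySem.Str.isIn kw entry then
        PySem.Str.replace e kw ("'" ++ kw ++ "'") else e) x).toList =
    (ks.map String.toList).foldl (pvStep entry.toList) x.toList := by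
  intro ks
  induction ks with
  | nil => intro x; simp
  | cons kw ks' ih =>
    intro x
    rw [List.foldl_cons, List.map_cons, List.foldl_cons, ih]
    congr 1
    unfold pvStep
    rw [PySem.Str.isIn_eq]
    split_ifs with h
    · rw [PySem.Str.toList_replace]
      congr 1
      rw [String.toList_append, String.toList_append]
      have : ("'" : String).toList = ['\''] := by decide
      simp [this]
    · rfl

-- ===== VERDICT (by name: the statement is the Claim_ definition above) =====
theorem string_comments_on_keywords_spec : Claim_equal_string_comments_on_keywords := by
  intro entry hdom hpre
  unfold Spec_string_comments_on_keywords
  have hpre' : ¬ ("gammax".toList <:+: entry.toList) := by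
    unfold Pre_string_comments_on_keywords at hpre
    rw [PySem.Str.isIn_eq] at hpre
    exact (PySem.Chars.isIn_eq_false_iff _ _).mp hpre
  apply String.toList_inj.mp
  have hA : (string_comments_on_keywords entry).toList = pvRendAll pvKw entry.toList := by
    unfold string_comments_on_keywords
    rw [portA_toList]
    have hmap : (["palette", "color", "bands", "min", "max", "gamma", "pointSize",
        "filter_index"].map String.toList) = pvKw := rfl
    rw [hmap]
    calc pvKw.foldl (pvStep entry.toList) entry.toList
        = pvKw.foldl (pvStep entry.toList) (pvRendAll [] entry.toList) := by
          rw [pvRendAll_nilS]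
      _ = pvRendAll pvKw entry.toList := pvFoldl_eq entry.toList hpre' pvKw [] (by simp)
  have hB : (string_comments_on_keywords_alt entry).toList = pvRendAll pvKw entry.toList := by
    unfold string_comments_on_keywords_alt
    rw [String.toList_ofList]
    exact pvScan_eq_rend entry.toList
  rw [hA, hB]
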